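-- pv_equiv track=rewrite | github.com/g1tsys/coding | Day 3 - Score 100/424-financial_management.py | find_best_investment
-- ===== SOURCE A (Python) =====
-- def find_best_investment(m, N, X, returns, risks, max_investments):
--     # 初始化最优投资方案数组，所有值为0
--     best_investment = [0] * m
--     # 初始化最佳利润为0
--     best_profit = 0
--
--     # 遍历所有可能的产品组合
--     for i in range(m):
--         # 首先考虑只投资一个产品的情况
--         invest_i = min(max_investments[i], N)  # 投资额不能超过该产品的最大投资额和总投资额N
--         # 检查该产品的风险是否在可接受范围内
--         if risks[i] <= X:
--             profit = invest_i * returns[i] // 100  # 计算投资该产品的回报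
--             # 如果该方案的利润超过目前已知的最佳利润，更新最优投资方案和最佳利润
--             if profit > best_profit:
--                 best_investment = [0] * m  # 重置最优投资方案为全0
--                 best_investment[i] = invest_i  # 更新最优投资方案，只投资第i个产品
--                 best_profit = profit
--
--         # 接下来考虑投资两个产品的组合
--         for j in range(i + 1, m):
--             # 对第一个产品进行投资额的遍历
--             for invest_i in range(1, min(max_investments[i], N) + 1):
--                 # 计算在投资了第一个产品后剩余的可投资额度，用于第二个产品
--                 invest_j = min(max_investments[j], N - invest_i)
--                 # 计算两个产品的总风险值
--                 risk = risks[i] + risks[j]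
--                 # 计算投资这两个产品的总回报
--                 profit = invest_i * returns[i] // 100 + invest_j * returns[j] // 100
--
--                 # 如果当前组合的风险在可接受范围内且利润高于目前最佳利润，更新最优投资组合
--                 if risk <= X and profit > best_profit:
--                     best_investment = [0] * m  # 重置最优投资方案为全0
--                     best_investment[i] = invest_i  # 更新投资第i个产品的额度
--                     best_investment[j] = invest_j  # 更新投资第j个产品的额度
--                     best_profit = profit  # 更新最佳利润
--
--     return best_investment
-- ===== SOURCE B (Python) =====
-- def find_best_investment(m, N, X, returns, risks, max_investments):
--     # Generate every candidate plan A considers, in the same scan order,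
--     # then select: first compute the maximum profit, then rebuild the plan
--     # from the first candidate attaining it (profit must be positive).
--     def candidates():
--         for i in range(m):
--             if risks[i] <= X:
--                 inv = min(max_investments[i], N)
--                 yield inv * returns[i] // 100, i, inv, None, 0
--             for j in range(i + 1, m):
--                 if risks[i] + risks[j] <= X:
--                     for a in range(1, min(max_investments[i], N) + 1):
--                         b = min(max_investments[j], N - a)
--                         yield (a * returns[i] // 100
--                                + b * returns[j] // 100, i, a, j, b)
--     best = max((c[0] for c in candidates()), default=0)
--     plan = [0] * m
--     if best > 0:
--         for p, i, a, j, b in candidates():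
--             if p == best:
--                 plan[i] = a
--                 if j is not None:
--                     plan[j] = b
--                 break
--     return plan
-- ===== Notes on version B (the rewrite author's own statement) =====
-- stated objective: alternative
-- what changed: A maintains a best-so-far profit and rebuilds the plan array inside the nested loops on every strict improvement; B instead generates the candidate plans as a stream, takes the maximum profit in one pass, and rebuilds the plan only once from the first candidate attaining that maximum.
-- outside the precondition, e.g. on find_best_investment(1, 5, 0, [], [1], [1]): A returns [0], B returns [0]
import Mathlib
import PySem

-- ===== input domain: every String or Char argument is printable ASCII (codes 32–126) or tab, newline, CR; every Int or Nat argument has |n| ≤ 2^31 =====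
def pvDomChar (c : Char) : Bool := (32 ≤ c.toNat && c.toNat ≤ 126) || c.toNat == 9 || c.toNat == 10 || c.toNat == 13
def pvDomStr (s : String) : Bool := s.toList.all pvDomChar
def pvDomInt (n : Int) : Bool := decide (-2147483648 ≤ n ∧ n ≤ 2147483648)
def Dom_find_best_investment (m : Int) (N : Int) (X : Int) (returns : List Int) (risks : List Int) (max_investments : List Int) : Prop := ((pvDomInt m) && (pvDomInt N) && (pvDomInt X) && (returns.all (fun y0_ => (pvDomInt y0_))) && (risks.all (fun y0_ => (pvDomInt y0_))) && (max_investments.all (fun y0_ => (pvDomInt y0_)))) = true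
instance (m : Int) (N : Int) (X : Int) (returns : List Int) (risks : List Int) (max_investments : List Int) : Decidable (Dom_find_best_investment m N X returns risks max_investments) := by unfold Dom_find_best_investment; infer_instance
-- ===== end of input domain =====

-- B restructures A's single mutating best-so-far scan into generate-candidates / take-max / rebuild-from-first-match; same asymptotic cost (objective: alternative).

-- ===== PORT A =====
-- Literal port of A: nested loops carrying (best_investment, best_profit), rebuilding the array on every strict improvement.
def find_best_investment (m : Int) (N : Int) (X : Int) (returns : List Int) (risks : List Int) (max_investments : List Int) : List Int :=
  let r := (PySem.List.pyRange 0 m 1).foldl (fun st i =>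
    let invest_i := min ((PySem.List.pyGet? max_investments i).getD 0) N
    let st :=
      if (PySem.List.pyGet? risks i).getD 0 ≤ X then
        let profit := PySem.Int.floordiv (invest_i * ((PySem.List.pyGet? returns i).getD 0)) 100
        if profit > st.2 then ((List.replicate m.toNat 0).set i.toNat invest_i, profit) else st
      else st
    (PySem.List.pyRange (i + 1) m 1).foldl (fun st j =>
      (PySem.List.pyRange 1 (min ((PySem.List.pyGet? max_investments i).getD 0) N + 1) 1).foldl (fun st invest_i =>
        let invest_j := min ((PySem.List.pyGet? max_investments j).getD 0) (N - invest_i)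
        let risk := (PySem.List.pyGet? risks i).getD 0 + (PySem.List.pyGet? risks j).getD 0
        let profit := PySem.Int.floordiv (invest_i * ((PySem.List.pyGet? returns i).getD 0)) 100 +
                      PySem.Int.floordiv (invest_j * ((PySem.List.pyGet? returns j).getD 0)) 100
        if risk ≤ X ∧ profit > st.2 then
          ((((List.replicate m.toNat 0).set i.toNat invest_i).set j.toNat invest_j), profit)
        else st) st) st) (List.replicate m.toNat 0, 0)
  r.1

-- ===== PORT B =====
-- A candidate plan: profit, first index and amount, optional second index and amount (Source B's yielded tuples).
structure Cand where
  p : Int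
  i : Int
  a : Int
  j : Option Int
  b : Int
deriving DecidableEq, Repr

-- Source B's candidates() generator, as a list (same scan order).
def fbiCandidates (m : Int) (N : Int) (X : Int) (returns : List Int) (risks : List Int) (max_investments : List Int) : List Cand :=
  (PySem.List.pyRange 0 m 1).flatMap (fun i =>
    (if (PySem.List.pyGet? risks i).getD 0 ≤ X then
      let inv := min ((PySem.List.pyGet? max_investments i).getD 0) N
      [⟨PySem.Int.floordiv (inv * ((PySem.List.pyGet? returns i).getD 0)) 100, i, inv, none, 0⟩]
     else []) ++
    (PySem.List.pyRange (i + 1) m 1).flatMap (fun j =>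
      if (PySem.List.pyGet? risks i).getD 0 + (PySem.List.pyGet? risks j).getD 0 ≤ X then
        (PySem.List.pyRange 1 (min ((PySem.List.pyGet? max_investments i).getD 0) N + 1) 1).map (fun a =>
          let b := min ((PySem.List.pyGet? max_investments j).getD 0) (N - a)
          ⟨PySem.Int.floordiv (a * ((PySem.List.pyGet? returns i).getD 0)) 100 +
           PySem.Int.floordiv (b * ((PySem.List.pyGet? returns j).getD 0)) 100, i, a, some j, b⟩)
      else []))

def find_best_investment_alt (m : Int) (N : Int) (X : Int) (returns : List Int) (risks : List Int) (max_investments : List Int) : List Int :=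
  let cs := fbiCandidates m N X returns risks max_investments
  let best := (PySem.List.max? (cs.map (fun c => c.p)) (fun x => x)).getD 0
  let plan := List.replicate m.toNat 0
  if best > 0 then
    match cs.find? (fun c => c.p == best) with
    | some c =>
      let plan := plan.set c.i.toNat c.a
      match c.j with
      | some j => plan.set j.toNat c.b
      | none => plan
    | none => plan
  else plan

-- ===== PRECONDITION & SPEC =====
-- Pre_ excludes m larger than a list's length: there the Python A raises IndexError, except in rare corners
-- (the out-of-range list is `returns` and no branch that reads returns[i] is ever reached), where both programs return the same all-zero plan anyway.
def Pre_find_best_investment (m : Int) (N : Int) (X : Int) (returns : List Int) (risks : List Int) (max_investments : List Int) : Prop :=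
  m ≤ (returns.length : Int) ∧ m ≤ (risks.length : Int) ∧ m ≤ (max_investments.length : Int)
instance (m : Int) (N : Int) (X : Int) (returns : List Int) (risks : List Int) (max_investments : List Int) : Decidable (Pre_find_best_investment m N X returns risks max_investments) := by unfold Pre_find_best_investment; infer_instance

def pvWitness_find_best_investment : Int × Int × Int × List Int × List Int × List Int :=
  (2, 10, 10, [200, 150], [3, 4], [5, 7])

def Spec_find_best_investment (m : Int) (N : Int) (X : Int) (returns : List Int) (risks : List Int) (max_investments : List Int) (out : List Int) : Prop := out = find_best_investment_alt m N X returns risks max_investments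
instance (m : Int) (N : Int) (X : Int) (returns : List Int) (risks : List Int) (max_investments : List Int) (out : List Int) : Decidable (Spec_find_best_investment m N X returns risks max_investments out) := by unfold Spec_find_best_investment; infer_instance

-- ===== CLAIM (what is proved, stated in full; the proofs are below) =====
def Claim_equal_find_best_investment : Prop := ∀ (m : Int) (N : Int) (X : Int) (returns : List Int) (risks : List Int) (max_investments : List Int), Dom_find_best_investment m N X returns risks max_investments → Pre_find_best_investment m N X returns risks max_investments → Spec_find_best_investment m N X returns risks max_investments (find_best_investment m N X returns risks max_investments)

-- ===== LEMMAS AND PROOFS =====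

-- The plan a candidate describes, exactly as both ports build it.
def mkVec (m : Int) (c : Cand) : List Int :=
  let r := (List.replicate m.toNat 0).set c.i.toNat c.a
  match c.j with
  | some j => r.set j.toNat c.b
  | none => r

-- A's update step, viewed on candidate tuples.
def upd (m : Int) (st : List Int × Int) (c : Cand) : List Int × Int :=
  if c.p > st.2 then (mkVec m c, c.p) else st

lemma foldl_ext {α β : Type} (f g : α → β → α) (l : List β) (s : α)
    (h : ∀ s x, f s x = g s x) : l.foldl f s = l.foldl g s := by
  induction l generalizing s with
  | nil => rfl
  | cons x t ih => simp only [List.foldl_cons, h, ih]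

lemma foldl_const {α β : Type} (l : List β) (s : α) : l.foldl (fun s _ => s) s = s := by
  induction l generalizing s with
  | nil => rfl
  | cons x t ih => simp only [List.foldl_cons]; exact ih _


-- A's nested loops are exactly one fold of `upd` over the candidate list.
lemma a_as_fold (m N X : Int) (returns risks max_investments : List Int) :
    find_best_investment m N X returns risks max_investments =
      ((fbiCandidates m N X returns risks max_investments).foldl (upd m)
        (List.replicate m.toNat 0, 0)).1 := by
  unfold find_best_investment fbiCandidates
  dsimp only
  rw [List.foldl_flatMap]
  refine congrArg Prod.fst (foldl_ext _ _ _ _ ?_)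
  intro st i
  dsimp only
  rw [List.foldl_append, List.foldl_flatMap]
  have hfirst :
      List.foldl (upd m) st
        (if (PySem.List.pyGet? risks i).getD 0 ≤ X then
          [⟨PySem.Int.floordiv ((min ((PySem.List.pyGet? max_investments i).getD 0) N) * ((PySem.List.pyGet? returns i).getD 0)) 100, i, min ((PySem.List.pyGet? max_investments i).getD 0) N, none, 0⟩]
         else []) =
      (if (PySem.List.pyGet? risks i).getD 0 ≤ X then
        if PySem.Int.floordiv ((min ((PySem.List.pyGet? max_investments i).getD 0) N) * ((PySem.List.pyGet? returns i).getD 0)) 100 > st.2 then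
          ((List.replicate m.toNat 0).set i.toNat (min ((PySem.List.pyGet? max_investments i).getD 0) N), PySem.Int.floordiv ((min ((PySem.List.pyGet? max_investments i).getD 0) N) * ((PySem.List.pyGet? returns i).getD 0)) 100)
        else st
       else st) := by
    by_cases h1 : (PySem.List.pyGet? risks i).getD 0 ≤ X <;>
      simp [h1, upd, mkVec]
  rw [hfirst]
  apply foldl_ext
  intro st j
  dsimp only
  by_cases h2 : (PySem.List.pyGet? risks i).getD 0 + (PySem.List.pyGet? risks j).getD 0 ≤ X
  · rw [if_pos h2, List.foldl_map]
    apply foldl_ext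
    intro st a
    simp only [upd, mkVec, h2, true_and]
  · rw [if_neg h2, List.foldl_nil]
    rw [foldl_ext _ (fun s _ => s) _ st (by intro s a; exact if_neg (fun hcond => h2 hcond.1)),
        foldl_const]

-- the running maximum, when it moved, is attained by some candidate
lemma foldl_max_attained (t : List Cand) (b0 : Int)
    (h : b0 < t.foldl (fun b c => max b c.p) b0) :
    ∃ c ∈ t, c.p = t.foldl (fun b c => max b c.p) b0 := by
  have hmap : (t.map Cand.p).foldl max b0 = t.foldl (fun b c => max b c.p) b0 :=
    List.foldl_map
  rcases PySem.List.foldl_max_mem (t.map Cand.p) b0 with he | hm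
  · rw [hmap] at he; omega
  · rw [hmap] at hm
    rcases List.mem_map.mp hm with ⟨c, hc, hpc⟩
    exact ⟨c, hc, hpc⟩

-- The best-so-far fold lands on the first candidate attaining the running maximum (when it improves on b0).
lemma foldl_upd_char (m : Int) (cs : List Cand) (v0 : List Int) (b0 : Int) :
    cs.foldl (upd m) (v0, b0) =
      (match cs.find? (fun c => c.p == cs.foldl (fun b c => max b c.p) b0) with
       | some c => if b0 < cs.foldl (fun b c => max b c.p) b0 then
            (mkVec m c, cs.foldl (fun b c => max b c.p) b0) else (v0, b0)
       | none => (v0, b0)) := by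
  induction cs generalizing v0 b0 with
  | nil => simp
  | cons c t ih =>
    simp only [List.foldl_cons]
    by_cases hc : b0 < c.p
    · rw [max_eq_right hc.le, show upd m (v0, b0) c = (mkVec m c, c.p) by simp [upd, hc], ih]
      have hle : c.p ≤ t.foldl (fun b c => max b c.p) c.p :=
        (PySem.List.le_foldl_max_int t Cand.p c.p).1
      by_cases he : c.p = t.foldl (fun b c => max b c.p) c.p
      · rw [List.find?_cons_of_pos (by simp [← he])]
        cases hfd : t.find? (fun x => x.p == t.foldl (fun b c => max b c.p) c.p) with
        | some c' => simp [← he, hc]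
        | none => simp [← he, hc]
      · have hlt : c.p < t.foldl (fun b c => max b c.p) c.p := lt_of_le_of_ne hle he
        rw [List.find?_cons_of_neg (by simp [he])]
        obtain ⟨cw, hcw, hpcw⟩ := foldl_max_attained t c.p hlt
        have hsome : (t.find? (fun x => x.p == t.foldl (fun b c => max b c.p) c.p)).isSome :=
          List.find?_isSome.mpr ⟨cw, hcw, by simp [hpcw]⟩
        cases hfd : t.find? (fun x => x.p == t.foldl (fun b c => max b c.p) c.p) with
        | none => simp [hfd] at hsome
        | some c' => simp [hlt, lt_trans hc hlt]
    · rw [max_eq_left (not_lt.mp hc), show upd m (v0, b0) c = (v0, b0) by simp [upd, not_lt.mp hc], ih]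
      have hb0M : b0 ≤ t.foldl (fun b c => max b c.p) b0 :=
        (PySem.List.le_foldl_max_int t Cand.p b0).1
      by_cases he : c.p = t.foldl (fun b c => max b c.p) b0
      · have hMb0 : t.foldl (fun b c => max b c.p) b0 = b0 :=
          le_antisymm (he ▸ (not_lt.mp hc)) hb0M
        rw [List.find?_cons_of_pos (by simp [← he])]
        cases hfd : t.find? (fun x => x.p == t.foldl (fun b c => max b c.p) b0) with
        | some c' => simp [hMb0]
        | none => simp [hMb0]
      · rw [List.find?_cons_of_neg (by simp [he])]

lemma foldl_max_shift (t : List Int) : ∀ a b : Int, t.foldl max (max a b) = max a (t.foldl max b) := by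
  induction t with
  | nil => intro a b; rfl
  | cons x t ih => intro a b; simp only [List.foldl_cons, max_assoc, ih]


-- ===== VERDICT (by name: the statement is the Claim_ definition above) =====
theorem find_best_investment_spec : Claim_equal_find_best_investment := by
  intro m N X returns risks max_investments _ _
  unfold Spec_find_best_investment
  rw [a_as_fold, foldl_upd_char]
  unfold find_best_investment_alt
  dsimp only
  cases hcs : fbiCandidates m N X returns risks max_investments with
  | nil => simp
  | cons c t =>
    simp only [List.map_cons]
    rw [PySem.List.max?_id_cons]
    simp only [Option.getD_some]
    have hmap : (t.map Cand.p).foldl max (max 0 c.p) = t.foldl (fun b c => max b c.p) (max 0 c.p) :=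
      List.foldl_map
    have hM : (c :: t).foldl (fun b c => max b c.p) 0 = max 0 ((t.map Cand.p).foldl max c.p) := by
      simp only [List.foldl_cons]
      rw [← hmap, foldl_max_shift]
    by_cases hb : (t.map Cand.p).foldl max c.p > 0
    · rw [if_pos hb]
      have hMb : (c :: t).foldl (fun b c => max b c.p) 0 = (t.map Cand.p).foldl max c.p := by
        rw [hM]; exact max_eq_right hb.le
      rw [hMb]
      have hmem : ∃ cw ∈ c :: t, cw.p = (t.map Cand.p).foldl max c.p := by
        rcases PySem.List.foldl_max_mem (t.map Cand.p) c.p with he | hm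
        · exact ⟨c, by simp, he.symm⟩
        · rcases List.mem_map.mp hm with ⟨cw, hcw, hpcw⟩
          exact ⟨cw, by simp [hcw], hpcw⟩
      have hsome : ((c :: t).find? (fun x => x.p == (t.map Cand.p).foldl max c.p)).isSome := by
        rcases hmem with ⟨cw, hcw, hpcw⟩
        exact List.find?_isSome.mpr ⟨cw, hcw, by simp [hpcw]⟩
      cases hfd : (c :: t).find? (fun x => x.p == (t.map Cand.p).foldl max c.p) with
      | none => simp [hfd] at hsome
      | some cw =>
        cases hj : cw.j with
        | some j => simp [mkVec, hj, hb]
        | none => simp [mkVec, hj, hb]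
    · rw [if_neg hb]
      have hM0 : (c :: t).foldl (fun b c => max b c.p) 0 = 0 := by
        rw [hM]; exact max_eq_left (not_lt.mp hb)
      rw [hM0]
      cases hfd : (c :: t).find? (fun x => x.p == (0 : Int)) with
      | some cw => simp
      | none => simp
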